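-- pv_equiv track=rewrite | github.com/rohitbishoyi10/Leetcode_dsa | sort_perfect_squre.py | find_perfect_squre
-- ===== SOURCE A (Python) =====
-- import math
--
-- def is_perfect_squre(no):
--      sq_rt = math.isqrt(no)
--      return sq_rt * sq_rt == no
--
-- def find_perfect_squre(arr):
--     nl = [math.isqrt(i) for i in arr if is_perfect_squre(i)]
--     nl.sort()
--     na = []
--     count = 0
--     for i in arr:
--         if is_perfect_squre(i):
--             na.append(nl[count])
--             count+=1
--         else:
--             na.append(i)
--     return na
-- ===== SOURCE B (Python) =====
-- import math
--
-- def is_perfect_squre(no):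
--     sq_rt = math.isqrt(no)
--     return sq_rt * sq_rt == no
--
-- def find_perfect_squre(arr):
--     # counting sort over the roots: tally multiplicities, then sweep the
--     # integer range min..max emitting each root multiplicity-many times.
--     counts = {}
--     for v in arr:
--         if is_perfect_squre(v):
--             r = math.isqrt(v)
--             counts[r] = counts.get(r, 0) + 1
--     if counts:
--         lo, hi = min(counts), max(counts)
--         roots = [r for r in range(lo, hi + 1) for _ in range(counts.get(r, 0))]
--     else:
--         roots = []
--     it = iter(roots)
--     return [next(it) if is_perfect_squre(v) else v for v in arr]
-- ===== Notes on version B (the rewrite author's own statement) =====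
-- stated objective: alternative
-- what changed: A comparison-sorts the list of roots and re-walks the array with a running counter into it; B never calls a comparison sort: it tallies root multiplicities in a dict and produces the ordered roots by a counting-sort sweep over the integer range min(counts)..max(counts), then rebuilds by draining an iterator in one comprehension.
import Mathlib
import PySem

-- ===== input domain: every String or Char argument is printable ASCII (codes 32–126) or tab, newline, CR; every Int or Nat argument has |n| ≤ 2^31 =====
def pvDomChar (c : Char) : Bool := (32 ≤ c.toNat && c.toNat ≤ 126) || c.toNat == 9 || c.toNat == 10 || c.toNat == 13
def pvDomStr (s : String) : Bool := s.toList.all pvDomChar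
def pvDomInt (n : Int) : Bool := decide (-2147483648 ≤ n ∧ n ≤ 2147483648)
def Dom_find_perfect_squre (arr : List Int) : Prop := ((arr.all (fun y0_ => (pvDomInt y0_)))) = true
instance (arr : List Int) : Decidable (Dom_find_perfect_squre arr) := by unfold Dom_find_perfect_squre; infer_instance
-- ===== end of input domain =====

-- B replaces A's comparison sort + counter-driven rebuild by a counting sort (dict of root multiplicities, swept over min..max) and an iterator-draining rebuild (alternative algorithm, same practical cost).

-- ===== PORT A =====
-- math.isqrt, exact for n ≥ 0 (Python raises ValueError for n < 0; those inputs are outside Pre_)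
def pyIsqrt (n : Int) : Int := (Nat.sqrt n.toNat : Int)

def is_perfect_squre (no : Int) : Bool :=
  let sq_rt := pyIsqrt no
  sq_rt * sq_rt == no

def find_perfect_squre (arr : List Int) : List Int :=
  let nl0 := (arr.filter (fun i => is_perfect_squre i)).map pyIsqrt
  let nl := PySem.List.sorted nl0 (fun x => x) false
  let st := arr.foldl (fun (p : List Int × Int) i =>
    if is_perfect_squre i then (p.1 ++ [PySem.List.pyGetD nl p.2 0], p.2 + 1)
    else (p.1 ++ [i], p.2)) ([], 0)
  st.1

-- ===== PORT B =====
-- '[next(it) if is_perfect_squre(v) else v for v in arr]': structural recursion draining rs;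
-- the [] branch of a drained rs is unreachable (roots has exactly one entry per square).
def rebuildB : List Int → List Int → List Int
  | [], _ => []
  | v :: vs, rs =>
    if is_perfect_squre v then
      match rs with
      | r :: rs' => r :: rebuildB vs rs'
      | [] => []
    else v :: rebuildB vs rs

def find_perfect_squre_alt (arr : List Int) : List Int :=
  let counts := arr.foldl (fun (d : PySem.Dict Int Int) v =>
    if is_perfect_squre v then d.insert (pyIsqrt v) (d.getD (pyIsqrt v) 0 + 1) else d)
    PySem.Dict.empty
  let roots :=
    if counts.items.isEmpty then ([] : List Int)
    else
      let lo := (PySem.List.min? counts.keys (fun x => x)).getD 0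
      let hi := (PySem.List.max? counts.keys (fun x => x)).getD 0
      (PySem.List.pyRange lo (hi + 1) 1).flatMap (fun r =>
        (PySem.List.pyRange 0 (counts.getD r 0) 1).map (fun _ => r))
  rebuildB arr roots

-- ===== PRECONDITION & SPEC =====
-- Pre_ excludes lists with a negative element, on which Python's math.isqrt raises ValueError in both A and B.
def Pre_find_perfect_squre (arr : List Int) : Prop := ∀ x ∈ arr, 0 ≤ x
instance (arr : List Int) : Decidable (Pre_find_perfect_squre arr) := by unfold Pre_find_perfect_squre; infer_instance
def pvWitness_find_perfect_squre : List Int := [9, 3, 4, 16, 1]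

def Spec_find_perfect_squre (arr : List Int) (out : List Int) : Prop := out = find_perfect_squre_alt arr
instance (arr : List Int) (out : List Int) : Decidable (Spec_find_perfect_squre arr out) := by unfold Spec_find_perfect_squre; infer_instance

-- ===== CLAIM (what is proved, stated in full; the proofs are below) =====
def Claim_equal_find_perfect_squre : Prop := ∀ (arr : List Int), Dom_find_perfect_squre arr → Pre_find_perfect_squre arr → Spec_find_perfect_squre arr (find_perfect_squre arr)

-- ===== LEMMAS AND PROOFS =====

-- reference function for A's loop: walk the array, replacing squares by nl[c], nl[c+1], …
def mergeFrom (nl : List Int) (c : Int) : List Int → List Int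
  | [] => []
  | x :: xs =>
    if is_perfect_squre x then PySem.List.pyGetD nl c 0 :: mergeFrom nl (c + 1) xs
    else x :: mergeFrom nl c xs

-- A's loop computes acc ++ mergeFrom nl c
theorem loopA_eq (nl : List Int) : ∀ (xs acc : List Int) (c : Int),
    (xs.foldl (fun (p : List Int × Int) i =>
      if is_perfect_squre i then (p.1 ++ [PySem.List.pyGetD nl p.2 0], p.2 + 1)
      else (p.1 ++ [i], p.2)) (acc, c)).1 = acc ++ mergeFrom nl c xs := by
  intro xs
  induction xs with
  | nil => intro acc c; simp [mergeFrom]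
  | cons x xs ih =>
    intro acc c
    by_cases hx : is_perfect_squre x <;> simp [mergeFrom, hx, ih]

theorem mergeFrom_shift : ∀ (xs : List Int) (r : Int) (nl : List Int) (c : Int), 0 ≤ c →
    mergeFrom (r :: nl) (c + 1) xs = mergeFrom nl c xs := by
  intro xs
  induction xs with
  | nil => intro r nl c _; simp [mergeFrom]
  | cons x xs ih =>
    intro r nl c hc
    obtain ⟨n, rfl⟩ : ∃ n : Nat, c = (n : Int) := ⟨c.toNat, by omega⟩
    have hget : PySem.List.pyGetD (r :: nl) ((n : Int) + 1) 0 = PySem.List.pyGetD nl (n : Int) 0 := by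
      have : ((n : Int) + 1) = ((n + 1 : Nat) : Int) := by push_cast; ring
      rw [this, PySem.List.pyGetD_natCast, PySem.List.pyGetD_natCast]
      simp [List.getD]
    by_cases hx : is_perfect_squre x <;>
      simp [mergeFrom, hx, hget, ih r nl ((n : Int) + 1) (by omega), ih r nl (n : Int) (by omega)]

-- A's rebuild (indexed) equals B's rebuild (list-draining) when the root list has one entry per square
theorem mergeFrom_eq_rebuildB : ∀ (xs nl : List Int),
    nl.length = (xs.filter (fun i => is_perfect_squre i)).length →
    mergeFrom nl 0 xs = rebuildB xs nl := by
  intro xs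
  induction xs with
  | nil => intro nl _; simp [mergeFrom, rebuildB]
  | cons x xs ih =>
    intro nl hlen
    by_cases hx : is_perfect_squre x
    · cases nl with
      | nil => simp [hx] at hlen
      | cons r nl' =>
        have h1 : mergeFrom (r :: nl') (0 + 1) xs = mergeFrom nl' 0 xs :=
          mergeFrom_shift xs r nl' 0 (by omega)
        simp only [mergeFrom, rebuildB, hx, if_true, PySem.List.pyGetD_zero_cons, h1]
        rw [ih nl' (by simp [hx] at hlen; omega)]
    · simp only [mergeFrom, rebuildB, hx, Bool.false_eq_true, if_false]
      rw [ih nl (by simpa [hx] using hlen)]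

-- counting-sort helpers -------------------------------------------------

theorem map_const_pyRange (c r : Int) :
    ((PySem.List.pyRange 0 c 1).map (fun _ => r)) = List.replicate c.toNat r := by
  rw [PySem.List.pyRange_one]
  simp [List.map_map, Function.comp, List.eq_replicate_iff]

theorem count_flatMap_replicate (a : Int) (c : Int → Nat) : ∀ (l : List Int), l.Nodup →
    (l.flatMap (fun r => List.replicate (c r) r)).count a = if a ∈ l then c a else 0 := by
  intro l
  induction l with
  | nil => intro _; simp
  | cons r l ih =>
    intro hnd
    rw [List.flatMap_cons, List.count_append, List.count_replicate, ih hnd.of_cons]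
    rcases List.nodup_cons.1 hnd with ⟨hr, _⟩
    by_cases ha : a = r
    · subst ha; simp [hr]
    · simp [ha, Ne.symm ha]

theorem pairwise_flatMap_replicate (c : Int → Nat) : ∀ (l : List Int), l.Pairwise (· < ·) →
    (l.flatMap (fun r => List.replicate (c r) r)).Pairwise (· ≤ ·) := by
  intro l
  induction l with
  | nil => intro _; simp
  | cons r l ih =>
    intro hp
    rw [List.flatMap_cons, List.pairwise_append]
    refine ⟨List.pairwise_replicate.2 (by simp), ih hp.of_cons, ?_⟩
    intro x hx y hy
    have hxr : x = r := List.eq_of_mem_replicate hx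
    obtain ⟨r', hr', hy'⟩ := List.mem_flatMap.1 hy
    have hyr : y = r' := List.eq_of_mem_replicate hy'
    have : r < r' := (List.pairwise_cons.1 hp).1 r' hr'
    omega

-- the counter loop of B is PySem.Dict.counter of A's root list nl0
theorem counts_eq_counter (arr : List Int) :
    (arr.foldl (fun (d : PySem.Dict Int Int) v =>
      if is_perfect_squre v then d.insert (pyIsqrt v) (d.getD (pyIsqrt v) 0 + 1) else d)
      PySem.Dict.empty)
      = PySem.Dict.counter ((arr.filter (fun i => is_perfect_squre i)).map pyIsqrt) := by
  rw [PySem.List.foldl_if_eq_foldl_filter]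
  rw [← List.foldl_map (f := pyIsqrt)
    (g := fun (d : PySem.Dict Int Int) r => d.insert r (d.getD r 0 + 1))]
  exact PySem.Dict.foldl_insert_getD_add_one_eq_counter _

-- the counting-sort sweep produces sorted(nl0)
theorem roots_eq_sorted (nl0 : List Int) :
    (if (PySem.Dict.counter nl0).items.isEmpty then ([] : List Int)
     else
      let lo := (PySem.List.min? (PySem.Dict.counter nl0).keys (fun x => x)).getD 0
      let hi := (PySem.List.max? (PySem.Dict.counter nl0).keys (fun x => x)).getD 0
      (PySem.List.pyRange lo (hi + 1) 1).flatMap (fun r =>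
        (PySem.List.pyRange 0 ((PySem.Dict.counter nl0).getD r 0) 1).map (fun _ => r)))
    = PySem.List.sorted nl0 (fun x => x) false := by
  by_cases hnil : nl0 = []
  · subst hnil; simp [PySem.Dict.counter, PySem.Dict.empty, PySem.List.sorted_eq_nil_iff]
  · have hkeys : (PySem.Dict.counter nl0).keys = PySem.Set.ofList nl0 :=
      PySem.Dict.keys_counter nl0
    have hkne : (PySem.Dict.counter nl0).keys ≠ [] := by
      rw [hkeys]
      intro h
      rcases List.exists_mem_of_ne_nil nl0 hnil with ⟨x, hx⟩
      have : x ∈ PySem.Set.ofList nl0 := by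
        rw [PySem.Set.mem_ofList]; exact hx
      rw [h] at this
      exact absurd this (List.not_mem_nil)
    have hne : ¬ (PySem.Dict.counter nl0).items.isEmpty = true := by
      intro h
      apply hkne
      have : (PySem.Dict.counter nl0).items = [] := List.isEmpty_iff.1 h
      simp [PySem.Dict.keys, this]
    rw [if_neg hne]
    obtain ⟨lo, hlo⟩ : ∃ m, PySem.List.min? (PySem.Dict.counter nl0).keys (fun x => x) = some m := by
      cases h : PySem.List.min? (PySem.Dict.counter nl0).keys (fun x => x) with
      | none => exact absurd ((PySem.List.min?_eq_none_iff _ _).1 h) hkne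
      | some m => exact ⟨m, rfl⟩
    obtain ⟨hi, hhi⟩ : ∃ m, PySem.List.max? (PySem.Dict.counter nl0).keys (fun x => x) = some m := by
      cases h : PySem.List.max? (PySem.Dict.counter nl0).keys (fun x => x) with
      | none => exact absurd ((PySem.List.max?_eq_none_iff _ _).1 h) hkne
      | some m => exact ⟨m, rfl⟩
    simp only [hlo, hhi, Option.getD_some]
    have hbound : ∀ a ∈ nl0, lo ≤ a ∧ a ≤ hi := by
      intro a ha
      have hk : a ∈ (PySem.Dict.counter nl0).keys := by
        rw [hkeys, PySem.Set.mem_ofList]; exact ha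
      exact ⟨PySem.List.min?_isMin hlo a hk, PySem.List.max?_isMax hhi a hk⟩
    have hrepl : ∀ r : Int,
        ((PySem.List.pyRange 0 ((PySem.Dict.counter nl0).getD r 0) 1).map (fun _ => r))
          = List.replicate (nl0.count r) r := by
      intro r
      rw [map_const_pyRange, PySem.Dict.getD_counter]
      simp
    have hflat : (PySem.List.pyRange lo (hi + 1) 1).flatMap (fun r =>
        (PySem.List.pyRange 0 ((PySem.Dict.counter nl0).getD r 0) 1).map (fun _ => r))
        = (PySem.List.pyRange lo (hi + 1) 1).flatMap (fun r => List.replicate (nl0.count r) r) := by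
      simp only [hrepl]
    rw [hflat]
    symm
    apply PySem.List.sorted_id_eq_of_perm_of_pairwise
    · rw [List.perm_iff_count]
      intro a
      rw [count_flatMap_replicate a (fun r => nl0.count r) _ (PySem.List.nodup_pyRange_one lo (hi + 1))]
      by_cases hmem : a ∈ PySem.List.pyRange lo (hi + 1) 1
      · rw [if_pos hmem]
      · rw [if_neg hmem]
        by_cases hin : a ∈ nl0
        · exact absurd (PySem.List.mem_pyRange_one.2
            ⟨(hbound a hin).1, by have := (hbound a hin).2; omega⟩) hmem
        · simp [List.count_eq_zero_of_not_mem hin]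
    · exact pairwise_flatMap_replicate _ _ (PySem.List.pairwise_lt_pyRange_one lo (hi + 1))

-- main equality: both programs compute the same list on every input
theorem ports_eq (arr : List Int) : find_perfect_squre arr = find_perfect_squre_alt arr := by
  unfold find_perfect_squre find_perfect_squre_alt
  simp only []
  rw [counts_eq_counter arr]
  rw [roots_eq_sorted ((arr.filter (fun i => is_perfect_squre i)).map pyIsqrt)]
  rw [loopA_eq _ arr [] 0, List.nil_append]
  apply mergeFrom_eq_rebuildB
  rw [PySem.List.length_sorted, List.length_map]

-- ===== VERDICT (by name: the statement is the Claim_ definition above) =====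
theorem find_perfect_squre_spec : Claim_equal_find_perfect_squre := by
  intro arr _ _
  exact ports_eq arr
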